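-- pv_equiv track=rewrite | github.com/aejester/the-cynical-wordler | v3/wordle_tools.py | get_incorrect_chars
-- ===== SOURCE A (Python) =====
-- def get_incorrect_chars(word: str, correct_word: str) -> list[str]:
--     incorrect = ["_", "_", "_", "_", "_"]
--
--     char_count = {}
--     already_counted = {}
--
--     for c in word:
--         if c not in char_count:
--             char_count[c] = 1
--         else:
--             char_count[c] += 1
--
--     for i in range(len(word)):
--         if word[i] not in correct_word:
--             incorrect[i] = word[i]
--         else:
--             if word[i] in char_count and word[i] not in already_counted:
--                 already_counted[word[i]] = 1
--             elif char_count[word[i]] > already_counted[word[i]]: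
--                 already_counted[word[i]] += 1
--                 incorrect[i] = word[i]
--     return incorrect
-- ===== SOURCE B (Python) =====
-- def get_incorrect_chars(word: str, correct_word: str) -> list[str]:
--     incorrect = ["_"] * 5
--     seen = set()
--     for i, c in enumerate(word):
--         if c not in correct_word:
--             incorrect[i] = c
--         elif c in seen:
--             incorrect[i] = c
--         else:
--             seen.add(c)
--     return incorrect
-- ===== Notes on version B (the rewrite author's own statement) =====
-- stated objective: simpler
-- what changed: B drops A's counting pre-pass and both dicts (char_count, already_counted) and does one pass over enumerate(word) with a single seen set, marking a letter when it is not in correct_word or repeats an earlier occurrence.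
import Mathlib
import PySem

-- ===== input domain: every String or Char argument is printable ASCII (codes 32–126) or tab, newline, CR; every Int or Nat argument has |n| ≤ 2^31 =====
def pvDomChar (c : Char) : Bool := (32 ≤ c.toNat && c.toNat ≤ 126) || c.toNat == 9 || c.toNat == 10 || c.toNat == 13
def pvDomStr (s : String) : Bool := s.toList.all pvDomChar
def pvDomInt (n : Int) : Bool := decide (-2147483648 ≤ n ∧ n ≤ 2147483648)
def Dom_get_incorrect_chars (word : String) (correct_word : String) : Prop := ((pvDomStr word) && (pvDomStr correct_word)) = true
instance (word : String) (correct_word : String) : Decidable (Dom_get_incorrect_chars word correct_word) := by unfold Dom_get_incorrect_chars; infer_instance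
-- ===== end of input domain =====

-- B replaces A's counting pre-pass and two dicts by one pass with a single `seen` set:
-- a repeated in-correct-word letter is always marked after its first occurrence (objective: simpler).

-- ===== PORT A =====
-- Literal port of A. 'c in correct_word' is List.contains on the chars (exact: the needle is one char);
-- 'incorrect[i] = …' is pySetD (exact under Pre_, where Python's assignment never goes out of range);
-- 'char_count[c] += 1' / 'already_counted[c] += 1' are Dict.modify with default 0 (exact: the key is
-- present whenever Python executes that statement); word[i] is pyGetD (i ∈ range(len(word)), in range).
def get_incorrect_chars (word : String) (correct_word : String) : List String :=
  let w := word.toList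
  let cw := correct_word.toList
  let char_count : PySem.Dict Char Int :=
    w.foldl (fun d c =>
      if !(d.contains c) then d.insert c 1 else d.modify c 0 (· + 1)) PySem.Dict.empty
  ((PySem.List.pyRange 0 (PySem.List.len w) 1).foldl
    (fun (st : List String × PySem.Dict Char Int) i =>
      let c := PySem.List.pyGetD w i ' '
      if !(cw.contains c) then (PySem.List.pySetD st.1 i (String.ofList [c]), st.2)
      else if char_count.contains c && !(st.2.contains c) then (st.1, st.2.insert c 1)
      else if char_count.getD c 0 > st.2.getD c 0 then
        (PySem.List.pySetD st.1 i (String.ofList [c]), st.2.modify c 0 (· + 1))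
      else (st.1, st.2))
    (["_", "_", "_", "_", "_"], PySem.Dict.empty)).1

-- ===== PORT B =====
-- Literal port of B (Source B): one pass over enumerate(word) with a single `seen` set.
def get_incorrect_chars_alt (word : String) (correct_word : String) : List String :=
  let cw := correct_word.toList
  ((PySem.List.enumerate word.toList 0).foldl
    (fun (st : List String × PySem.Set Char) ic =>
      if !(cw.contains ic.2) then (PySem.List.pySetD st.1 ic.1 (String.ofList [ic.2]), st.2)
      else if PySem.Set.contains st.2 ic.2 then (PySem.List.pySetD st.1 ic.1 (String.ofList [ic.2]), st.2)
      else (st.1, PySem.Set.add st.2 ic.2))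
    (["_", "_", "_", "_", "_"], PySem.Set.empty)).1

-- ===== PRECONDITION & SPEC =====
-- Python A (and B) raises IndexError exactly when some index i ≥ 5 gets an assignment
-- 'incorrect[i] = …', i.e. when word[i] is outside correct_word or repeats an earlier letter
-- of word; Pre_ admits exactly the inputs on which A returns.
def Pre_get_incorrect_chars (word : String) (correct_word : String) : Prop :=
  ∀ i ∈ List.range word.toList.length, 5 ≤ i →
    (word.toList.getD i ' ' ∈ correct_word.toList ∧ word.toList.getD i ' ' ∉ word.toList.take i)
instance (word : String) (correct_word : String) : Decidable (Pre_get_incorrect_chars word correct_word) := by unfold Pre_get_incorrect_chars; infer_instance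

def pvWitness_get_incorrect_chars : String × String := ("melee", "eagle")

def Spec_get_incorrect_chars (word : String) (correct_word : String) (out : List String) : Prop := out = get_incorrect_chars_alt word correct_word
instance (word : String) (correct_word : String) (out : List String) : Decidable (Spec_get_incorrect_chars word correct_word out) := by unfold Spec_get_incorrect_chars; infer_instance

-- ===== CLAIM (what is proved, stated in full; the proofs are below) =====
def Claim_equal_get_incorrect_chars : Prop := ∀ (word : String) (correct_word : String), Dom_get_incorrect_chars word correct_word → Pre_get_incorrect_chars word correct_word → Spec_get_incorrect_chars word correct_word (get_incorrect_chars word correct_word)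

-- ===== LEMMAS AND PROOFS =====

-- A's index-loop body, as a function of the pair (i, word[i]).
def pvStepA (cw : List Char) (cc : PySem.Dict Char Int)
    (st : List String × PySem.Dict Char Int) (ic : Int × Char) :
    List String × PySem.Dict Char Int :=
  if !(cw.contains ic.2) then (PySem.List.pySetD st.1 ic.1 (String.ofList [ic.2]), st.2)
  else if cc.contains ic.2 && !(st.2.contains ic.2) then (st.1, st.2.insert ic.2 1)
  else if cc.getD ic.2 0 > st.2.getD ic.2 0 then
    (PySem.List.pySetD st.1 ic.1 (String.ofList [ic.2]), st.2.modify ic.2 0 (· + 1))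
  else (st.1, st.2)

-- B's loop body.
def pvStepB (cw : List Char)
    (st : List String × PySem.Set Char) (ic : Int × Char) :
    List String × PySem.Set Char :=
  if !(cw.contains ic.2) then (PySem.List.pySetD st.1 ic.1 (String.ofList [ic.2]), st.2)
  else if PySem.Set.contains st.2 ic.2 then (PySem.List.pySetD st.1 ic.1 (String.ofList [ic.2]), st.2)
  else (st.1, PySem.Set.add st.2 ic.2)

-- A's counting pre-pass as a named function (definitionally the fold inside the port).
def pvCC (w : List Char) : PySem.Dict Char Int :=
  w.foldl (fun d c => if !(d.contains c) then d.insert c 1 else d.modify c 0 (· + 1))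
    PySem.Dict.empty

-- A's counting pre-pass: value = running count, key set = chars seen.
theorem pvCharCount (l : List Char) :
    ∀ (d : PySem.Dict Char Int) (c : Char),
      ((l.foldl (fun d c => if !(d.contains c) then d.insert c 1 else d.modify c 0 (· + 1)) d).getD c 0
        = d.getD c 0 + (l.count c : Int))
      ∧ ((l.foldl (fun d c => if !(d.contains c) then d.insert c 1 else d.modify c 0 (· + 1)) d).contains c
        = (d.contains c || l.contains c)) := by
  induction l with
  | nil => intro d c; simp
  | cons x t ih =>
    intro d c
    simp only [List.foldl_cons]
    by_cases hx : d.contains x = true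
    · simp only [hx, Bool.not_true, Bool.false_eq_true, if_false]
      constructor
      · rw [(ih _ c).1, PySem.Dict.getD_modify]
        by_cases hcx : c = x
        · subst hcx; simp [List.count_cons_self]; ring
        · simp [hcx, List.count_cons, Ne.symm hcx]
      · rw [(ih _ c).2, PySem.Dict.contains_modify, List.contains_cons]
        cases h1 : (c == x) <;> cases h2 : d.contains c <;> simp [h1, h2]
    · simp only [Bool.not_eq_true] at hx
      simp only [hx, Bool.not_false, if_true]
      constructor
      · rw [(ih _ c).1, PySem.Dict.getD_insert]
        by_cases hcx : c = x
        · subst hcx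
          rw [PySem.Dict.getD_of_not_contains d 0 hx]
          simp [List.count_cons_self]
          omega
        · simp [hcx, List.count_cons, Ne.symm hcx]
      · rw [(ih _ c).2, PySem.Dict.contains_insert, List.contains_cons]
        cases h1 : (c == x) <;> cases h2 : d.contains c <;> simp [h1, h2]

-- Main loop invariant: with already_counted holding the per-prefix counts (keys = in-correct-word
-- chars of the prefix) and seen holding the same key set, the two loops build the same list.
theorem pvMain (cw : List Char) (cc : PySem.Dict Char Int) (w : List Char)
    (hccD : ∀ c, cc.getD c 0 = (w.count c : Int))
    (hccC : ∀ c, c ∈ w → cc.contains c = true) :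
    ∀ (rest p : List Char) (s : Int) (inc : List String)
      (ac : PySem.Dict Char Int) (seen : PySem.Set Char),
      w = p ++ rest →
      (∀ c, ac.getD c 0 = ((p.filter (fun x => cw.contains x)).count c : Int)) →
      (∀ c, ac.contains c = (p.filter (fun x => cw.contains x)).contains c) →
      (∀ c, PySem.Set.contains seen c = (p.filter (fun x => cw.contains x)).contains c) →
      ((PySem.List.enumerate rest s).foldl (pvStepA cw cc) (inc, ac)).1
        = ((PySem.List.enumerate rest s).foldl (pvStepB cw) (inc, seen)).1 := by
  intro rest
  induction rest with
  | nil => intro p s inc ac seen _ _ _ _; simp [PySem.List.enumerate]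
  | cons c t ih =>
    intro p s inc ac seen hw hacD hacC hseen
    rw [PySem.List.enumerate_cons, List.foldl_cons, List.foldl_cons]
    by_cases hcw : cw.contains c = true
    · have hcmem : c ∈ cw := by simpa using hcw
      by_cases hmem : c ∈ p.filter (fun x => cw.contains x)
      · -- repeat occurrence of an in-correct-word char: both mark position s
        have hpmem : c ∈ p := List.mem_of_mem_filter hmem
        have hacCc : ac.contains c = true := by
          rw [hacC]; exact List.contains_iff_mem.mpr hmem
        have hsmem : c ∈ seen := (PySem.Set.contains_iff seen c).mp (by
          rw [hseen]; exact List.contains_iff_mem.mpr hmem)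
        have hgt : cc.getD c 0 > ac.getD c 0 := by
          rw [hccD, hacD, hw, List.count_filter hcw, List.count_append, List.count_cons_self]
          have := List.count_le_length (l := t) (a := c)
          omega
        rw [show pvStepA cw cc (inc, ac) (s, c)
              = (PySem.List.pySetD inc s (String.ofList [c]), ac.modify c 0 (· + 1)) by
            simp [pvStepA, hcmem, hacCc, hgt]]
        rw [show pvStepB cw (inc, seen) (s, c)
              = (PySem.List.pySetD inc s (String.ofList [c]), seen) by
            simp [pvStepB, hcmem, hsmem]]
        refine ih (p ++ [c]) (s + 1) _ _ _ (by simpa using hw) ?_ ?_ ?_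
        · intro c'
          rw [PySem.Dict.getD_modify, List.filter_append, List.count_append]
          by_cases hcc' : c' = c
          · subst hcc'; rw [hacD]; simp [List.filter_cons, hcmem]
          · rw [if_neg hcc', hacD c']
            simp [List.filter_cons, hcmem, List.count_singleton, hcc', Ne.symm hcc']
        · intro c'
          rw [PySem.Dict.contains_modify, List.filter_append, List.contains_append, hacC c']
          by_cases hcc' : c' = c
          · subst hcc'; simp [List.filter_cons, hcmem, List.contains_iff_mem, hpmem]
          · simp [beq_iff_eq, hcc', List.filter_cons, hcmem]
        · intro c'
          rw [hseen, List.filter_append, List.contains_append]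
          by_cases hcc' : c' = c
          · subst hcc'; simp [List.filter_cons, hcmem, List.contains_iff_mem, hpmem]
          · simp [beq_iff_eq, hcc', List.filter_cons, hcmem]
      · -- first occurrence: both leave the blank and record c
        have hacCc : ac.contains c = false := by
          rw [hacC, Bool.eq_false_iff]
          intro hcon
          exact hmem (List.contains_iff_mem.mp hcon)
        have hsnomem : c ∉ seen := by
          intro hc
          have := (PySem.Set.contains_iff seen c).mpr hc
          rw [hseen] at this
          exact hmem (List.contains_iff_mem.mp this)
        have hccCc : cc.contains c = true := hccC c (by rw [hw]; simp)
        rw [show pvStepA cw cc (inc, ac) (s, c) = (inc, ac.insert c 1) by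
            simp [pvStepA, hcmem, hacCc, hccCc]]
        rw [show pvStepB cw (inc, seen) (s, c) = (inc, PySem.Set.add seen c) by
            simp [pvStepB, hcmem, hsnomem]]
        have hcnt0 : (p.filter (fun x => cw.contains x)).count c = 0 :=
          List.count_eq_zero.mpr hmem
        refine ih (p ++ [c]) (s + 1) _ _ _ (by simpa using hw) ?_ ?_ ?_
        · intro c'
          rw [PySem.Dict.getD_insert, List.filter_append, List.count_append]
          by_cases hcc' : c' = c
          · subst hcc'
            rw [if_pos rfl, hcnt0]
            simp [List.filter_cons, hcmem]
          · rw [if_neg hcc', hacD c']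
            simp [List.filter_cons, hcmem, List.count_singleton, hcc', Ne.symm hcc']
        · intro c'
          rw [PySem.Dict.contains_insert, List.filter_append, List.contains_append, hacC c']
          by_cases hcc' : c' = c
          · subst hcc'; simp [List.filter_cons, hcmem]
          · simp [beq_iff_eq, hcc', List.filter_cons, hcmem]
        · intro c'
          have h2 : PySem.Set.contains (PySem.Set.add seen c) c'
              = (PySem.Set.contains seen c' || (c' == c)) := by
            by_cases hm : c' ∈ PySem.Set.add seen c
            · rw [(PySem.Set.contains_iff _ _).mpr hm]
              rcases (PySem.Set.mem_add _ _ _).mp hm with h | h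
              · rw [(PySem.Set.contains_iff _ _).mpr h]; simp
              · simp [h]
            · have ha : PySem.Set.contains (PySem.Set.add seen c) c' = false :=
                Bool.eq_false_iff.mpr (fun hcon => hm ((PySem.Set.contains_iff _ _).mp hcon))
              have hb : PySem.Set.contains seen c' = false :=
                Bool.eq_false_iff.mpr (fun hcon =>
                  hm ((PySem.Set.mem_add _ _ _).mpr (Or.inl ((PySem.Set.contains_iff _ _).mp hcon))))
              have hc' : (c' == c) = false := by
                rw [beq_eq_false_iff_ne]
                intro h; subst h
                exact hm ((PySem.Set.mem_add _ _ _).mpr (Or.inr rfl))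
              rw [ha, hb, hc']; simp
          rw [h2, hseen, List.filter_append, List.contains_append]
          by_cases hcc' : c' = c
          · subst hcc'; simp [List.filter_cons, hcmem]
          · simp [beq_iff_eq, hcc', List.filter_cons, hcmem]
    · -- c not in correct_word: both mark position s, states unchanged
      simp only [Bool.not_eq_true] at hcw
      have hcmem : c ∉ cw := by simpa using hcw
      rw [show pvStepA cw cc (inc, ac) (s, c)
            = (PySem.List.pySetD inc s (String.ofList [c]), ac) by simp [pvStepA, hcmem]]
      rw [show pvStepB cw (inc, seen) (s, c)
            = (PySem.List.pySetD inc s (String.ofList [c]), seen) by simp [pvStepB, hcmem]]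
      refine ih (p ++ [c]) (s + 1) _ _ _ (by simpa using hw) ?_ ?_ ?_
      · intro c'; rw [hacD, List.filter_append]; simp [hcmem]
      · intro c'; rw [hacC, List.filter_append]; simp [hcmem]
      · intro c'; rw [hseen, List.filter_append]; simp [hcmem]

-- ===== VERDICT (by name: the statement is the Claim_ definition above) =====
theorem get_incorrect_chars_spec : Claim_equal_get_incorrect_chars := by
  intro word correct_word _ _
  show get_incorrect_chars word correct_word = get_incorrect_chars_alt word correct_word
  have hB : get_incorrect_chars_alt word correct_word
      = ((PySem.List.enumerate word.toList 0).foldl (pvStepB correct_word.toList)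
          (["_", "_", "_", "_", "_"], PySem.Set.empty)).1 := rfl
  have hA : get_incorrect_chars word correct_word
      = ((PySem.List.enumerate word.toList 0).foldl
          (pvStepA correct_word.toList (pvCC word.toList))
          (["_", "_", "_", "_", "_"], PySem.Dict.empty)).1 := by
    show ((PySem.List.pyRange 0 (PySem.List.len word.toList) 1).foldl
        (fun st i => pvStepA correct_word.toList (pvCC word.toList) st
          (i, PySem.List.pyGetD word.toList i ' '))
        (["_", "_", "_", "_", "_"], PySem.Dict.empty)).1 = _
    rw [PySem.List.enumerate_eq_map_pyRange (d := ' '), List.foldl_map]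
  rw [hA, hB]
  exact pvMain correct_word.toList (pvCC word.toList) word.toList
    (fun c => by
      unfold pvCC
      rw [(pvCharCount word.toList PySem.Dict.empty c).1]
      simp)
    (fun c hc => by
      unfold pvCC
      rw [(pvCharCount word.toList PySem.Dict.empty c).2]
      simp [hc])
    word.toList [] 0 ["_", "_", "_", "_", "_"] PySem.Dict.empty PySem.Set.empty
    (by simp) (fun c => by simp) (fun c => by simp) (fun c => by simp [PySem.Set.empty])
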